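-- pv_equiv track=rewrite | github.com/Taoge123/OptimizedLeetcode | LeetcodeNew/python/LC_321.py | maximize
-- ===== SOURCE A (Python) =====
-- def maximize(nums, length):
--     dp, i = {length: nums}, 0
--     while (length):
--         while (i + 1 < length and nums[i] >= nums[i + 1]):
--             i += 1
--         nums, length = nums[:i] + nums[i + 1:], length - 1
--         dp[length] = nums
--         if i > 0: i -= 1
--     return dp
-- ===== SOURCE B (Python) =====
-- def maximize(nums, length):
--     # Per-length greedy: dp[k] is built by an independent monotonic-stack pass
--     # over the first `length` elements (the window A's scan is confined to),
--     # with the untouched suffix appended back.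
--     head, tail = nums[:length], nums[length:]
--     dp = {length: nums}
--     for k in range(length - 1, -1, -1):
--         stack, drops = [], length - k
--         for x in head:
--             while stack and drops and stack[-1] < x:
--                 stack.pop()
--                 drops -= 1
--             stack.append(x)
--         dp[k] = stack[:k] + tail
--     return dp
-- ===== Notes on version B (the rewrite author's own statement) =====
-- stated objective: alternative
-- what changed: A runs one incremental walk with a persistent scan pointer, repeatedly deleting the first-ascent element of the shrinking list to derive each dp entry from the previous one; B builds each dp[k] independently with a monotonic-stack pass over the first `length` elements (pop while the top is smaller and removals remain, then truncate to k) and appends the untouched suffix.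
-- outside the precondition, e.g. on maximize([], 1): A returns {1: [], 0: []}, B returns {1: [], 0: []}
import Mathlib
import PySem

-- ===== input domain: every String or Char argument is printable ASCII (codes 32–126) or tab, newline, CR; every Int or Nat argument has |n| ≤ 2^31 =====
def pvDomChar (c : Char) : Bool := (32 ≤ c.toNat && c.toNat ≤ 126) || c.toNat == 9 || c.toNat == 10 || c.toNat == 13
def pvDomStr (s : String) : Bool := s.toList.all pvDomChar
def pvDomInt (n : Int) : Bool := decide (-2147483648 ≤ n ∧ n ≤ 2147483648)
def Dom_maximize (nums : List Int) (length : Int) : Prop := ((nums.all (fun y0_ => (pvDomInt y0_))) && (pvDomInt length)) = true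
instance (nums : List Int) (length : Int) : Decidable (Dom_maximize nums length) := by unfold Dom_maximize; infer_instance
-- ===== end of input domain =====

-- B replaces A's single incremental-removal walk (with a persistent scan pointer) by an
-- independent monotonic-stack pass per target length; return values proved equal on
-- 0 ≤ length ≤ len(nums), exactly where A terminates normally.

-- ===== PORT A =====
-- inner `while i + 1 < length and nums[i] >= nums[i+1]: i += 1`.
-- Fuel bounds the scan; the caller passes (length - i).toNat, which always suffices
-- since the loop takes at most length - i - 1 steps.
-- The `| _, _ => i` arm is where Python raises IndexError (only reachable outside Pre_).
def maximizeInner (nums : List Int) (length i : Int) : Nat → Int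
  | 0 => i
  | fuel + 1 =>
    if i + 1 < length then
      match PySem.List.pyGet? nums i, PySem.List.pyGet? nums (i + 1) with
      | some a, some b => if b ≤ a then maximizeInner nums length (i + 1) fuel else i
      | _, _ => i
    else i

-- outer `while (length): …`; the dict assignment `dp[length] = nums` always uses a fresh
-- key (length strictly decreases), so on the association list it is exactly an append.
-- Fuel = length.toNat: the Python loop runs exactly `length` times when length ≥ 0
-- (for negative length Python never returns — outside Pre_, the port just stops).
def maximizeOuter (nums : List Int) (length i : Int) (dp : List (Int × List Int)) :
    Nat → List (Int × List Int)
  | 0 => dp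
  | fuel + 1 =>
    if length = 0 then dp
    else
      let i' := maximizeInner nums length i (length - i).toNat
      let nums' := PySem.List.slice nums none (some i') ++ PySem.List.slice nums (some (i' + 1)) none
      maximizeOuter nums' (length - 1) (if i' > 0 then i' - 1 else i') (dp ++ [(length - 1, nums')]) fuel

def maximize (nums : List Int) (length : Int) : List (Int × List Int) :=
  maximizeOuter nums length 0 [(length, nums)] length.toNat

-- ===== PORT B =====
-- `while stack and drops and stack[-1] < x: stack.pop(); drops -= 1`
-- (the stack is kept top-first, i.e. reversed w.r.t. the Python list).
def maximizePop (stack : List Int) (drops x : Int) : List Int × Int :=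
  match stack with
  | [] => ([], drops)
  | top :: rest =>
    if drops ≠ 0 ∧ top < x then maximizePop rest (drops - 1) x else (top :: rest, drops)

-- one monotonic-stack pass over `head` with `drops` removals allowed; result in Python order
def maximizeStack (head : List Int) (drops : Int) : List Int :=
  (head.foldl (fun (p : List Int × Int) x =>
      let q := maximizePop p.1 p.2 x
      (x :: q.1, q.2)) ([], drops)).1.reverse

-- `dp[k] = …` always uses a fresh key (k descends from length-1), so it is an append.
def maximize_alt (nums : List Int) (length : Int) : List (Int × List Int) :=
  let head := PySem.List.slice nums none (some length)
  let tail := PySem.List.slice nums (some length) none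
  (PySem.List.pyRange (length - 1) (-1) (-1)).foldl
    (fun dp k =>
      dp ++ [(k, PySem.List.slice (maximizeStack head (length - k)) none (some k) ++ tail)])
    [(length, nums)]

-- ===== PRECONDITION & SPEC =====
-- Pre_ excludes length outside 0..len(nums): there A loops forever (negative length) or
-- raises IndexError (length > len(nums)) — except the degenerate case length = 1 on a
-- shorter list, where A still returns and B happens to agree anyway.
def Pre_maximize (nums : List Int) (length : Int) : Prop :=
  0 ≤ length ∧ length ≤ nums.length
instance (nums : List Int) (length : Int) : Decidable (Pre_maximize nums length) := by
  unfold Pre_maximize; infer_instance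

def pvWitness_maximize : List Int × Int := ([9, 1, 2, 5, 8, 3], 4)

def Spec_maximize (nums : List Int) (length : Int) (out : List (Int × List Int)) : Prop :=
  out = maximize_alt nums length
instance (nums : List Int) (length : Int) (out : List (Int × List Int)) :
    Decidable (Spec_maximize nums length out) := by unfold Spec_maximize; infer_instance

-- ===== CLAIM (what is proved, stated in full; the proofs are below) =====
def Claim_equal_maximize : Prop := ∀ (nums : List Int) (length : Int),
  Dom_maximize nums length → Pre_maximize nums length →
  Spec_maximize nums length (maximize nums length)

-- ===== LEMMAS AND PROOFS =====

-- `rem1 W`: remove the element at the first strict ascent of W (the last element if W is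
-- non-ascending).  One step of A's walk, restricted to the window of the first t elements.
def rem1 : List Int → List Int
  | [] => []
  | [_] => []
  | a :: b :: r => if a < b then b :: r else a :: rem1 (b :: r)

-- the association list A accumulates: keys t-1 … 0 with successively reduced windows
def remEntries : Nat → List Int → List Int → List (Int × List Int)
  | 0, _, _ => []
  | t + 1, W, S => ((t : Int), rem1 W ++ S) :: remEntries t (rem1 W) S

theorem rem1_length : ∀ (W : List Int), (rem1 W).length = W.length - 1
  | [] => rfl
  | [_] => rfl
  | a :: b :: r => by
    by_cases h : a < b <;> simp [rem1, h, rem1_length (b :: r)]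

theorem rem1_nonasc : ∀ (W : List Int), W.IsChain (· ≥ ·) → rem1 W = W.dropLast
  | [], _ => rfl
  | [_], _ => rfl
  | a :: b :: r, h => by
    rw [List.isChain_cons_cons] at h
    have hab : ¬ a < b := not_lt.mpr h.1
    simp [rem1, hab, rem1_nonasc (b :: r) h.2]

theorem rem1_ascent : ∀ (N : List Int) (a b : Int) (R : List Int),
    (N ++ [a]).IsChain (· ≥ ·) → a < b → rem1 (N ++ a :: b :: R) = N ++ b :: R
  | [], a, b, R, _, hab => by simp [rem1, hab]
  | c :: N, a, b, R, hch, hab => by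
    have hh := List.isChain_cons.mp (by simpa using hch)
    have ih := rem1_ascent N a b R hh.2 hab
    cases N with
    | nil =>
      have hca : c ≥ a := hh.1 a (by simp)
      simp [rem1, not_lt.mpr hca, hab]
    | cons d N' =>
      have hcd : c ≥ d := hh.1 d (by simp)
      have hstep : rem1 (c :: d :: (N' ++ a :: b :: R))
          = if c < d then d :: (N' ++ a :: b :: R)
            else c :: rem1 (d :: (N' ++ a :: b :: R)) := rfl
      simp only [List.cons_append] at ih ⊢
      rw [hstep, if_neg (not_lt.mpr hcd), ih]

-- every list is non-ascending or splits at its first strict ascent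
theorem chain_or_split : ∀ (W : List Int),
    W.IsChain (· ≥ ·) ∨ ∃ N a b R, W = N ++ a :: b :: R ∧ (N ++ [a]).IsChain (· ≥ ·) ∧ a < b
  | [] => Or.inl (by simp)
  | [a] => Or.inl (List.IsChain.singleton a)
  | a :: b :: r => by
    by_cases hab : a < b
    · exact Or.inr ⟨[], a, b, r, by simp, List.IsChain.singleton a, hab⟩
    · rcases chain_or_split (b :: r) with hc | ⟨N, x, y, R, heq, hch, hxy⟩
      · exact Or.inl (List.IsChain.cons_cons (not_lt.mp hab) hc)
      · refine Or.inr ⟨a :: N, x, y, R, by rw [List.cons_append, ← heq], ?_, hxy⟩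
        rw [List.cons_append, List.isChain_cons]
        refine ⟨?_, hch⟩
        intro h hh
        have : (N ++ [x]).head? = (N ++ x :: y :: R).head? := by
          cases N <;> simp
        rw [this, ← heq] at hh
        simp at hh
        omega

-- === B side: the stack pass computes iterated rem1 ===

theorem maximizePop_zero (st : List Int) (x : Int) : maximizePop st 0 x = (st, 0) := by
  cases st <;> simp [maximizePop]

theorem foldl_stack_zero : ∀ (L : List Int) (st : List Int),
    L.foldl (fun (p : List Int × Int) x =>
        let q := maximizePop p.1 p.2 x
        (x :: q.1, q.2)) (st, 0) = (L.reverse ++ st, 0)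
  | [], st => by simp
  | x :: L, st => by
    simp only [List.foldl_cons, maximizePop_zero]
    rw [foldl_stack_zero L (x :: st)]
    simp

-- folding a non-ascending list onto a stack whose top dominates its head pushes everything
theorem foldl_stack_nonasc : ∀ (L : List Int) (st : List Int) (d : Int),
    L.IsChain (· ≥ ·) → (∀ x, st.head? = some x → ∀ y, L.head? = some y → y ≤ x) →
    L.foldl (fun (p : List Int × Int) x =>
        let q := maximizePop p.1 p.2 x
        (x :: q.1, q.2)) (st, d) = (L.reverse ++ st, d)
  | [], st, d, _, _ => by simp
  | x :: L, st, d, hL, hst => by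
    have hpop : maximizePop st d x = (st, d) := by
      rcases st with _ | ⟨top, rest⟩
      · rfl
      · have : x ≤ top := hst top rfl x rfl
        simp [maximizePop, not_lt.mpr this]
    simp only [List.foldl_cons, hpop]
    rw [foldl_stack_nonasc L (x :: st) d]
    · simp
    · exact (List.isChain_cons.mp hL).2
    · intro z hz y hy
      simp at hz
      exact hz ▸ (List.isChain_cons.mp hL).1 y hy


theorem stack_nonasc (W : List Int) (d : Int) (h : W.IsChain (· ≥ ·)) :
    maximizeStack W d = W := by
  have := foldl_stack_nonasc W [] d h (by simp)
  simp [maximizeStack, this]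

theorem stack_ascent_step (W : List Int) (s : Int) (hs : 0 ≤ s)
    (N : List Int) (a b : Int) (R : List Int)
    (heq : W = N ++ a :: b :: R) (hch : (N ++ [a]).IsChain (· ≥ ·)) (hab : a < b) :
    maximizeStack W (s + 1) = maximizeStack (rem1 W) s := by
  subst heq
  rw [rem1_ascent N a b R hch hab]
  have hchN : N.IsChain (· ≥ ·) := hch.prefix ⟨[a], rfl⟩
  unfold maximizeStack
  rw [show N ++ a :: b :: R = (N ++ [a]) ++ (b :: R) by simp]
  rw [List.foldl_append (l := N ++ [a]) (l' := b :: R),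
      List.foldl_append (l := N) (l' := b :: R)]
  rw [foldl_stack_nonasc (N ++ [a]) [] (s + 1) hch (by simp),
      foldl_stack_nonasc N [] s hchN (by simp)]
  simp only [List.foldl_cons, List.reverse_append, List.append_nil, List.reverse_cons,
    List.reverse_nil, List.nil_append, List.singleton_append]
  have hpop : maximizePop (a :: N.reverse) (s + 1) b = maximizePop N.reverse s b := by
    rw [maximizePop]
    simp [hab, show s + 1 ≠ 0 by omega]
  rw [hpop]

theorem iter_rem1_nonasc : ∀ (k : Nat) (W : List Int), W.IsChain (· ≥ ·) →
    rem1^[k] W = W.take (W.length - k)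
  | 0, W, _ => by simp
  | k + 1, W, h => by
    rw [Function.iterate_succ_apply, rem1_nonasc W h,
        iter_rem1_nonasc k W.dropLast h.dropLast]
    rw [List.dropLast_eq_take, List.length_take, List.take_take]
    congr 1
    omega

-- the central fact: the stack pass with budget s, truncated to |W| - s, is s greedy removals
theorem stack_eq_iter : ∀ (s : Nat) (W : List Int), s ≤ W.length →
    (maximizeStack W (s : Int)).take (W.length - s) = rem1^[s] W
  | 0, W, _ => by
    have h0 : maximizeStack W 0 = W := by
      unfold maximizeStack
      rw [foldl_stack_zero]
      simp
    simp [h0]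
  | s + 1, W, hs => by
    rcases chain_or_split W with hc | ⟨N, a, b, R, heq, hch, hab⟩
    · rw [stack_nonasc W _ hc, iter_rem1_nonasc (s + 1) W hc]
    · rw [show ((s + 1 : Nat) : Int) = (s : Int) + 1 by omega,
          stack_ascent_step W (s : Int) (by omega) N a b R heq hch hab]
      have hlen : (rem1 W).length = W.length - 1 := rem1_length W
      rw [show W.length - (s + 1) = (rem1 W).length - s by omega]
      rw [stack_eq_iter s (rem1 W) (by omega)]
      rw [← Function.iterate_succ_apply]

-- === A side: the walk with the persistent pointer performs iterated rem1 ===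

theorem innerA_noasc (W S : List Int) : ∀ (fuel : Nat) (i : Int),
    W.IsChain (· ≥ ·) → 0 ≤ i → i < W.length → (W.length : Int) - i ≤ fuel →
    maximizeInner (W ++ S) (W.length) i fuel = (W.length : Int) - 1
  | 0, i => by intro _ _ hi hf; omega
  | fuel + 1, i => by
    intro hW h0 hi hf
    rw [maximizeInner]
    by_cases hcond : i + 1 < (W.length : Int)
    · have hiN : i.toNat + 1 < W.length := by omega
      have g1 : PySem.List.pyGet? (W ++ S) i = some (W[i.toNat]) := by
        rw [PySem.List.pyGet?_of_nonneg _ h0, List.getElem?_append_left (by omega)]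
        exact List.getElem?_eq_getElem (by omega)
      have g2 : PySem.List.pyGet? (W ++ S) (i + 1) = some (W[i.toNat + 1]) := by
        rw [PySem.List.pyGet?_of_nonneg _ (by omega : (0:Int) ≤ i + 1), List.getElem?_append_left
          (by omega : (i + 1).toNat < W.length)]
        rw [show (i + 1).toNat = i.toNat + 1 by omega]
        exact List.getElem?_eq_getElem (by omega)
      have hge : W[i.toNat + 1] ≤ W[i.toNat] := List.isChain_iff_getElem.mp hW i.toNat hiN
      rw [if_pos hcond, g1, g2]
      simp only [hge, if_pos]
      rw [innerA_noasc W S fuel (i + 1) hW (by omega) (by omega) (by omega)]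
    · rw [if_neg hcond]
      omega

theorem innerA_ascent (N : List Int) (a b : Int) (R S : List Int) : ∀ (fuel : Nat) (i : Int),
    (N ++ [a]).IsChain (· ≥ ·) → a < b → 0 ≤ i → i ≤ N.length →
    (N.length : Int) - i < fuel →
    maximizeInner ((N ++ a :: b :: R) ++ S) ((N ++ a :: b :: R).length) i fuel = N.length
  | 0, i => by intro _ _ _ hi hf; omega
  | fuel + 1, i => by
    intro hch hab h0 hi hf
    have hlen : (N ++ a :: b :: R).length = N.length + 2 + R.length := by simp; omega
    rw [maximizeInner]
    by_cases hN : i = (N.length : Int)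
    · subst hN
      rw [if_pos (by rw [hlen]; push_cast; omega)]
      have g1 : PySem.List.pyGet? ((N ++ a :: b :: R) ++ S) (N.length : Int) = some a := by
        rw [show (N ++ a :: b :: R) ++ S = N ++ a :: (b :: R ++ S) by simp]
        exact PySem.List.pyGet?_append_length N _ a
      have g2 : PySem.List.pyGet? ((N ++ a :: b :: R) ++ S) ((N.length : Int) + 1) = some b := by
        rw [show (N ++ a :: b :: R) ++ S = (N ++ [a]) ++ b :: (R ++ S) by simp,
            show (N.length : Int) + 1 = ((N ++ [a]).length : Int) by simp]
        exact PySem.List.pyGet?_append_length (N ++ [a]) _ b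
      rw [g1, g2]
      simp [show ¬ b ≤ a by omega]
    · -- i < N.length : inside the non-ascending prefix, step forward
      have hiN : i.toNat + 1 < (N ++ [a]).length := by simp; omega
      have g1 : PySem.List.pyGet? ((N ++ a :: b :: R) ++ S) i = some ((N ++ [a])[i.toNat]) := by
        rw [show (N ++ a :: b :: R) ++ S = (N ++ [a]) ++ (b :: R ++ S) by simp]
        rw [PySem.List.pyGet?_of_nonneg _ h0, List.getElem?_append_left (by omega)]
        exact List.getElem?_eq_getElem (by omega)
      have g2 : PySem.List.pyGet? ((N ++ a :: b :: R) ++ S) (i + 1) =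
          some ((N ++ [a])[i.toNat + 1]) := by
        rw [show (N ++ a :: b :: R) ++ S = (N ++ [a]) ++ (b :: R ++ S) by simp]
        rw [PySem.List.pyGet?_of_nonneg _ (by omega : (0:Int) ≤ i + 1), List.getElem?_append_left
          (by omega : (i + 1).toNat < (N ++ [a]).length)]
        rw [show (i + 1).toNat = i.toNat + 1 by omega]
        exact List.getElem?_eq_getElem (by omega)
      have hge : (N ++ [a])[i.toNat + 1] ≤ (N ++ [a])[i.toNat] :=
        List.isChain_iff_getElem.mp hch i.toNat hiN
      rw [if_pos (by rw [hlen]; push_cast; omega), g1, g2]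
      simp only [hge, if_pos]
      exact innerA_ascent N a b R S fuel (i + 1) hch hab (by omega) (by omega) (by omega)

theorem take_one_chain (W : List Int) : (W.take 1).IsChain (· ≥ ·) := by
  rcases W with _ | ⟨x, w⟩
  · simp
  · simp [List.IsChain.singleton x]

theorem outerA_spec : ∀ (t : Nat) (W S : List Int) (i : Int) (dp : List (Int × List Int)),
    W.length = t → 0 ≤ i → (1 ≤ t → i < t) → (W.take (i.toNat + 1)).IsChain (· ≥ ·) →
    maximizeOuter (W ++ S) (t : Int) i dp t = dp ++ remEntries t W S
  | 0, W, S, i, dp => by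
    intro hW _ _ _
    simp [maximizeOuter, remEntries]
  | t + 1, W, S, i, dp => by
    intro hW h0 hi hc
    have hit : i < (t : Int) + 1 := by have := hi (by omega); omega
    rw [maximizeOuter, if_neg (by push_cast; omega)]
    rcases chain_or_split W with hch | ⟨N, a, b, R, heq, hch, hab⟩
    · -- non-ascending window: the scan runs to the end, the last element is removed
      have hI : maximizeInner (W ++ S) ((t + 1 : Nat) : Int) i (((t + 1 : Nat) : Int) - i).toNat
          = ((t + 1 : Nat) : Int) - 1 := by
        rw [show ((t + 1 : Nat) : Int) = (W.length : Int) by rw [hW]]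
        exact innerA_noasc W S _ i hch h0 (by omega) (by omega)
      have hsl1 : PySem.List.slice (W ++ S) none (some (((t + 1 : Nat) : Int) - 1))
          = W.dropLast := by
        rw [show ((t + 1 : Nat) : Int) - 1 = ((t : Nat) : Int) by omega,
            PySem.List.slice_to_natCast]
        rw [List.take_append_of_le_length (by omega), List.dropLast_eq_take, hW]
        norm_num
      have hsl2 : PySem.List.slice (W ++ S) (some ((((t + 1 : Nat) : Int) - 1) + 1)) none
          = S := by
        rw [show (((t + 1 : Nat) : Int) - 1) + 1 = ((t + 1 : Nat) : Int) by ring,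
            PySem.List.slice_from_natCast, ← hW, List.drop_left]
      simp only [hI, hsl1, hsl2]
      rw [show W.dropLast ++ S = rem1 W ++ S by rw [rem1_nonasc W hch]]
      have hrec := outerA_spec t (rem1 W) S
        (if ((t + 1 : Nat) : Int) - 1 > 0 then ((t + 1 : Nat) : Int) - 1 - 1
          else ((t + 1 : Nat) : Int) - 1)
        (dp ++ [(((t + 1 : Nat) : Int) - 1, rem1 W ++ S)])
        (by rw [rem1_length, hW]; omega) (by split <;> push_cast <;> omega)
        (by intro h; split <;> push_cast <;> omega)
        (by
          refine (rem1_nonasc W hch ▸ hch.dropLast).prefix ?_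
          exact List.take_prefix _ _)
      rw [show ((t + 1 : Nat) : Int) - 1 = (t : Int) by omega] at hrec ⊢
      rw [hrec]
      simp [remEntries]
    · -- window with a first ascent at position |N|
      subst heq
      have hNlen : N.length + 2 + R.length = t + 1 := by simp at hW; omega
      have hrem : rem1 (N ++ a :: b :: R) = N ++ b :: R := rem1_ascent N a b R hch hab
      have hiN : i.toNat ≤ N.length := by
        by_contra hgt
        have hpre : (N ++ [a, b]) <+: (N ++ a :: b :: R).take (i.toNat + 1) := by
          rw [List.prefix_take_iff]
          constructor
          · refine ⟨R, by simp⟩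
          · simp; omega
        have hcc := hc.prefix hpre
        rw [List.isChain_append] at hcc
        have := (List.isChain_cons_cons.mp hcc.2.1).1
        omega
      have hI : maximizeInner ((N ++ a :: b :: R) ++ S) ((t + 1 : Nat) : Int)
          i (((t + 1 : Nat) : Int) - i).toNat = (N.length : Int) := by
        rw [show ((t + 1 : Nat) : Int) = (((N ++ a :: b :: R).length : Nat) : Int) by rw [hW]]
        exact innerA_ascent N a b R S _ i hch hab h0 (by omega) (by omega)
      have hsl1 : PySem.List.slice ((N ++ a :: b :: R) ++ S) none (some (N.length : Int))
          = N := by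
        rw [PySem.List.slice_to_natCast]
        simp
      have hsl2 : PySem.List.slice ((N ++ a :: b :: R) ++ S) (some ((N.length : Int) + 1)) none
          = b :: (R ++ S) := by
        rw [show (N.length : Int) + 1 = (((N ++ [a]).length : Nat) : Int) by simp,
            PySem.List.slice_from_natCast]
        rw [show (N ++ a :: b :: R) ++ S = (N ++ [a]) ++ (b :: (R ++ S)) by simp,
            List.drop_left]
      simp only [hI, hsl1, hsl2]
      rw [show N ++ b :: (R ++ S) = (rem1 (N ++ a :: b :: R)) ++ S by rw [hrem]; simp]
      have hchN : N.IsChain (· ≥ ·) := hch.prefix ⟨[a], rfl⟩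
      have hrec := outerA_spec t (rem1 (N ++ a :: b :: R)) S
        (if (N.length : Int) > 0 then (N.length : Int) - 1 else (N.length : Int))
        (dp ++ [(((t + 1 : Nat) : Int) - 1, rem1 (N ++ a :: b :: R) ++ S)])
        (by rw [rem1_length]; simp at hW ⊢; omega) (by split <;> omega)
        (by intro _; split <;> omega)
        (by
          rw [hrem]
          by_cases hN0 : (N.length : Int) > 0
          · rw [if_pos hN0, show (((N.length : Int) - 1).toNat + 1) = N.length by omega]
            rw [List.take_append_of_le_length (le_refl N.length), List.take_length]
            exact hchN
          · rw [if_neg hN0]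
            have hN : N = [] := List.eq_nil_of_length_eq_zero (by omega)
            subst hN
            exact take_one_chain (b :: R))
      rw [show ((t + 1 : Nat) : Int) - 1 = (t : Int) by omega] at hrec ⊢
      rw [hrec]
      simp [remEntries]

-- === assembling B's fold into remEntries ===

theorem alt_entries : ∀ (t : Nat) (W S : List Int), W.length = t →
    (PySem.List.pyRange ((t : Int) - 1) (-1) (-1)).map
      (fun k => (k, PySem.List.slice (maximizeStack W ((t : Int) - k)) none (some k) ++ S))
      = remEntries t W S
  | 0, W, S => by
    intro _
    rw [PySem.List.pyRange_neg_one_eq_nil (by omega)]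
    rfl
  | t + 1, W, S => by
    intro hW
    rw [show ((t + 1 : Nat) : Int) - 1 = (t : Int) by omega,
        PySem.List.pyRange_neg_one_cons (by omega)]
    simp only [List.map_cons]
    have hhead : PySem.List.slice (maximizeStack W (((t + 1 : Nat) : Int) - (t : Int)))
        none (some (t : Int)) ++ S = rem1 W ++ S := by
      rw [show ((t + 1 : Nat) : Int) - (t : Int) = ((1 : Nat) : Int) by omega,
          PySem.List.slice_to_natCast]
      have h1 := stack_eq_iter 1 W (by omega)
      rw [show W.length - 1 = t by omega] at h1
      rw [h1, Function.iterate_one]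
    rw [hhead]
    have htail : (PySem.List.pyRange ((t : Int) - 1) (-1) (-1)).map
        (fun k => (k, PySem.List.slice (maximizeStack W (((t + 1 : Nat) : Int) - k))
          none (some k) ++ S))
        = remEntries t (rem1 W) S := by
      rw [← alt_entries t (rem1 W) S (by rw [rem1_length, hW]; omega)]
      refine List.map_congr_left ?_
      intro k hk
      rw [PySem.List.mem_pyRange_neg_one] at hk
      have hk0 : 0 ≤ k := by omega
      have hkt : k.toNat ≤ t - 1 ∨ t = 0 := by omega
      have hkt' : k.toNat < t := by omega
      have e1 : ((t + 1 : Nat) : Int) - k = (((t + 1 - k.toNat : Nat)) : Int) := by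
        push_cast; omega
      have e2 : (t : Int) - k = (((t - k.toNat : Nat)) : Int) := by omega
      have hL := stack_eq_iter (t + 1 - k.toNat) W (by omega)
      have hR := stack_eq_iter (t - k.toNat) (rem1 W) (by rw [rem1_length, hW]; omega)
      rw [show W.length - (t + 1 - k.toNat) = k.toNat by omega] at hL
      rw [show (rem1 W).length - (t - k.toNat) = k.toNat by rw [rem1_length, hW]; omega] at hR
      have hiter : rem1^[t + 1 - k.toNat] W = rem1^[t - k.toNat] (rem1 W) := by
        rw [show t + 1 - k.toNat = (t - k.toNat) + 1 by omega, Function.iterate_succ_apply]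
      rw [e1, e2]
      rw [show some k = some ((k.toNat : Int)) by rw [Int.toNat_of_nonneg hk0],
          PySem.List.slice_to_natCast, PySem.List.slice_to_natCast]
      rw [hL, hR, hiter]
    rw [htail]
    rfl

-- ===== VERDICT (by name: the statement is the Claim_ definition above) =====
theorem maximize_spec : Claim_equal_maximize := by
  intro nums L _ hpre
  obtain ⟨h0, h1⟩ := hpre
  unfold Spec_maximize maximize maximize_alt
  set t := L.toNat with ht
  have hLt : L = (t : Int) := by omega
  have htlen : t ≤ nums.length := by omega
  set W := nums.take t with hWdef
  set S := nums.drop t with hSdef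
  have hWlen : W.length = t := by rw [hWdef, List.length_take]; omega
  have hsplit : nums = W ++ S := (List.take_append_drop t nums).symm
  -- A's side
  have hA : maximizeOuter nums L 0 [(L, nums)] L.toNat
      = [(L, nums)] ++ remEntries t W S := by
    rw [show maximizeOuter nums L 0 [(L, nums)] L.toNat
        = maximizeOuter (W ++ S) ((t : Nat) : Int) 0 [(L, nums)] t by
      rw [← hsplit, ← hLt, ← ht]]
    exact outerA_spec t W S 0 [(L, nums)] hWlen le_rfl (by omega)
      (by simpa using take_one_chain W)
  -- B's side
  have hhead : PySem.List.slice nums none (some L) = W := by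
    rw [hLt, PySem.List.slice_to_natCast]
  have htail : PySem.List.slice nums (some L) none = S := by
    rw [hLt, PySem.List.slice_from_natCast]
  rw [hA, hhead, htail]
  rw [PySem.List.foldl_append_singleton_eq_map
    (f := fun k => (k, PySem.List.slice (maximizeStack W (L - k)) none (some k) ++ S))]
  rw [hLt, alt_entries t W S hWlen]
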